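-- pv_equiv track=rewrite | github.com/14857/Baekjoon | 백준/Silver/2685. 님비합/님비합.py | NimSum
-- ===== SOURCE A (Python) =====
-- def change(N, B):
--     res = []
--     while N:
--         N, r = divmod(N, B)
--         res.append(r)
--     return res
--
-- def NimSum(B, X, Y):
--     if X < Y: # X에 Y를 더하기 위해 길이가 X가 Y보다 같거나 길게 한다.
--         X, Y = Y, X
--     X = change(X, B)
--     Y = change(Y, B)
--
--     for i in range(len(Y)): # Y의 길이만큼 각 자리마다 계산
--         X[i] = (X[i] + Y[i]) % B
--
--     res = 0; b = 1 # 결과를 10진수 변환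
--     for i in range(len(X)):
--         res += X[i] * b
--         b *= B
--     return res
-- ===== SOURCE B (Python) =====
-- def NimSum(B, X, Y):
--     res = 0
--     b = 1
--     while X or Y:
--         X, dx = divmod(X, B)
--         Y, dy = divmod(Y, B)
--         res += ((dx + dy) % B) * b
--         b *= B
--     return res
-- ===== Notes on version B (the rewrite author's own statement) =====
-- stated objective: simpler
-- what changed: Replaces A's three-phase pipeline (explicit digit lists for both operands via a change() helper, an X<Y swap, an in-place digit-add loop, and a reconversion loop) with one interleaved divmod loop that keeps only an accumulator and the current place value, never materialising digit lists.
-- outside the precondition, e.g. on NimSum(-2, -5, -3): A returns 2, B returns 2; on NimSum(-3, -7, -2): A raises IndexError, B returns -6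
import Mathlib
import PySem

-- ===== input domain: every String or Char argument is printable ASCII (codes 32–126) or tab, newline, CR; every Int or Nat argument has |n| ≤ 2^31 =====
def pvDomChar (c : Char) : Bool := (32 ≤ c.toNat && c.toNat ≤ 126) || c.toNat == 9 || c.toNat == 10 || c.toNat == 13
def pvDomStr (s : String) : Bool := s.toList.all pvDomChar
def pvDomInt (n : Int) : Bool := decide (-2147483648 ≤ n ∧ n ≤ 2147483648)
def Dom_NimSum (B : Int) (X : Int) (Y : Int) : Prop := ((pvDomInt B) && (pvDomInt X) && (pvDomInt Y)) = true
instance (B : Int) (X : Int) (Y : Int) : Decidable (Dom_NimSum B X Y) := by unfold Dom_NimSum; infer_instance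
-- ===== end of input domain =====

-- B replaces A's three-phase digit-list pipeline by one interleaved divmod loop (objective: simpler).

-- Termination measure for the divmod-digit loops (shared by both ports' recursions).
def pvM (n : Int) : Nat := 2 * n.natAbs + (if 0 < n then 1 else 0)

theorem pvM_floordiv_lt (B N : Int) (h : (2 ≤ B ∧ 0 < N) ∨ (B ≤ -2 ∧ N ≠ 0)) :
    pvM (PySem.Int.floordiv N B) < pvM N := by
  have hadd := PySem.Int.floordiv_mul_add_mod N B
  set q := PySem.Int.floordiv N B with hq
  set r := PySem.Int.mod N B with hr
  rcases h with ⟨hB, hN⟩ | ⟨hB, hN⟩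
  · have h1 : 0 ≤ r := PySem.Int.mod_nonneg N (by omega)
    have h2 : r < B := PySem.Int.mod_lt N (by omega)
    have hq0 : 0 ≤ q := by nlinarith
    have hq2 : 2 * q ≤ N := by nlinarith
    unfold pvM; split_ifs <;> omega
  · have h1 : B < r ∧ r ≤ 0 := PySem.Int.mod_neg_bounds N (by omega)
    by_cases hNp : 0 < N
    · have hq0 : q ≤ 0 := by nlinarith
      have hqN : -N ≤ q := by
        nlinarith [mul_nonneg (show (0:Int) ≤ -q by omega) (show (0:Int) ≤ -B by omega)]
      unfold pvM; split_ifs <;> omega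
    · have hNn : N < 0 := by omega
      have hq0 : 0 ≤ q := by nlinarith
      have h2q : 2 * q ≤ -N := by nlinarith
      unfold pvM; split_ifs <;> omega

theorem pvM_floordiv_le (B N : Int) (h : (2 ≤ B ∧ 0 ≤ N) ∨ B ≤ -2) :
    pvM (PySem.Int.floordiv N B) ≤ pvM N := by
  by_cases hN : N = 0
  · subst hN
    have hadd := PySem.Int.floordiv_mul_add_mod 0 B
    have hz : PySem.Int.floordiv 0 B = 0 := by
      rcases h with ⟨hB, _⟩ | hB
      · have h1 : 0 ≤ PySem.Int.mod 0 B := PySem.Int.mod_nonneg 0 (by omega)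
        have h2 : PySem.Int.mod 0 B < B := PySem.Int.mod_lt 0 (by omega)
        nlinarith
      · have h1 := PySem.Int.mod_neg_bounds 0 (b := B) (by omega)
        nlinarith [h1.1, h1.2]
    rw [hz]
  · exact le_of_lt (pvM_floordiv_lt B N (by omega))

theorem pvStep1 (B N : Int) (hN : ¬N = 0) (h : (2 ≤ B ∧ 0 < N) ∨ B ≤ -2) :
    pvM (PySem.Int.floordiv N B) < pvM N := by
  apply pvM_floordiv_lt
  omega

theorem pvStep2 (B X Y : Int) (hz : ¬(X = 0 ∧ Y = 0))
    (h : (2 ≤ B ∧ 0 ≤ X ∧ 0 ≤ Y) ∨ B ≤ -2) :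
    pvM (PySem.Int.floordiv X B) + pvM (PySem.Int.floordiv Y B) < pvM X + pvM Y := by
  have hX : pvM (PySem.Int.floordiv X B) ≤ pvM X := pvM_floordiv_le B X (by tauto)
  have hY : pvM (PySem.Int.floordiv Y B) ≤ pvM Y := pvM_floordiv_le B Y (by tauto)
  by_cases hx0 : X = 0
  · have := pvM_floordiv_lt B Y (by omega)
    omega
  · have := pvM_floordiv_lt B X (by omega)
    omega

-- ===== PORT A =====
-- change(N, B): the while-loop with its appended-to list; the extra guard only totalizes the
-- recursion (where it is false Python diverges, outside Pre_).
def changeGo (B : Int) (N : Int) (acc : List Int) : List Int :=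
  if N = 0 then acc
  else if h : (2 ≤ B ∧ 0 < N) ∨ B ≤ -2 then
    changeGo B (PySem.Int.floordiv N B) (acc ++ [PySem.Int.mod N B])
  else acc
termination_by pvM N
decreasing_by exact pvStep1 B N (by assumption) (by assumption)

def change (N : Int) (B : Int) : List Int := changeGo B N []

-- for i in range(len(Y)): X[i] = (X[i] + Y[i]) % B — structural walk over both lists;
-- the ([], _::_) case is Python's IndexError (unreachable under Pre_).
def addInto (B : Int) : List Int → List Int → List Int
  | xs, [] => xs
  | [], _ :: _ => []
  | x :: xs, y :: ys => PySem.Int.mod (x + y) B :: addInto B xs ys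

-- res = 0; b = 1; for i in range(len(X)): res += X[i]*b; b *= B
def evalGo (B : Int) : List Int → Int → Int → Int
  | [], res, _ => res
  | d :: ds, res, b => evalGo B ds (res + d * b) (b * B)

def NimSum (B : Int) (X : Int) (Y : Int) : Int :=
  let p := if X < Y then (Y, X) else (X, Y)
  evalGo B (addInto B (change p.1 B) (change p.2 B)) 0 1

-- ===== PORT B =====
-- while X or Y: X, dx = divmod(X, B); Y, dy = divmod(Y, B); res += ((dx+dy) % B) * b; b *= B
-- (guard only totalizes; where it is false Python raises or diverges, outside Pre_).
def nimGo (B : Int) (X : Int) (Y : Int) (res : Int) (b : Int) : Int :=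
  if X = 0 ∧ Y = 0 then res
  else if h : (2 ≤ B ∧ 0 ≤ X ∧ 0 ≤ Y) ∨ B ≤ -2 then
    nimGo B (PySem.Int.floordiv X B) (PySem.Int.floordiv Y B)
      (res + PySem.Int.mod (PySem.Int.mod X B + PySem.Int.mod Y B) B * b) (b * B)
  else res
termination_by pvM X + pvM Y
decreasing_by exact pvStep2 B X Y (by assumption) (by assumption)

def NimSum_alt (B : Int) (X : Int) (Y : Int) : Int := nimGo B X Y 0 1

-- ===== PRECONDITION & SPEC =====
-- Pre_ also excludes inputs on which A happens to return: with B ≤ -2 and a negative operand A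
-- raises IndexError on many inputs but returns on others (whether it raises depends on the relative
-- digit-lengths of the operands, not expressible in closed form), and with B ≥ 2 a negative operand
-- makes A's change() loop forever; |B| ≤ 1 diverges or raises except for the trivial X = Y = 0.
def Pre_NimSum (B : Int) (X : Int) (Y : Int) : Prop :=
  (2 ≤ B ∨ B ≤ -2) ∧ 0 ≤ X ∧ 0 ≤ Y
instance (B : Int) (X : Int) (Y : Int) : Decidable (Pre_NimSum B X Y) := by
  unfold Pre_NimSum; infer_instance

def pvWitness_NimSum : Int × Int × Int := (3, 25, 14)

def Spec_NimSum (B : Int) (X : Int) (Y : Int) (out : Int) : Prop := out = NimSum_alt B X Y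
instance (B : Int) (X : Int) (Y : Int) (out : Int) : Decidable (Spec_NimSum B X Y out) := by
  unfold Spec_NimSum; infer_instance

-- ===== CLAIM (what is proved, stated in full; the proofs are below) =====
def Claim_equal_NimSum : Prop :=
  ∀ (B : Int) (X : Int) (Y : Int), Dom_NimSum B X Y → Pre_NimSum B X Y →
    Spec_NimSum B X Y (NimSum B X Y)

-- ===== LEMMAS AND PROOFS =====

-- Pure (non-accumulator) form of change's digit list.
def digitsL (B : Int) (N : Int) : List Int :=
  if N = 0 then []
  else if h : (2 ≤ B ∧ 0 < N) ∨ B ≤ -2 then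
    PySem.Int.mod N B :: digitsL B (PySem.Int.floordiv N B)
  else []
termination_by pvM N
decreasing_by exact pvStep1 B N (by assumption) (by assumption)

-- Common recursive description of the digitwise mod-B sum.
def nimR (B : Int) (X : Int) (Y : Int) : Int :=
  if X = 0 ∧ Y = 0 then 0
  else if h : (2 ≤ B ∧ 0 ≤ X ∧ 0 ≤ Y) ∨ B ≤ -2 then
    PySem.Int.mod (PySem.Int.mod X B + PySem.Int.mod Y B) B +
      B * nimR B (PySem.Int.floordiv X B) (PySem.Int.floordiv Y B)
  else 0
termination_by pvM X + pvM Y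
decreasing_by exact pvStep2 B X Y (by assumption) (by assumption)
theorem fd_mono {B a c : Int} (hB : 0 < B) (h : a ≤ c) :
    PySem.Int.floordiv a B ≤ PySem.Int.floordiv c B := by
  have da := PySem.Int.floordiv_mul_add_mod a B
  have dc := PySem.Int.floordiv_mul_add_mod c B
  have r1 : 0 ≤ PySem.Int.mod a B := PySem.Int.mod_nonneg a (by omega)
  have r2 : PySem.Int.mod a B < B := PySem.Int.mod_lt a (by omega)
  have r3 : 0 ≤ PySem.Int.mod c B := PySem.Int.mod_nonneg c (by omega)
  have r4 : PySem.Int.mod c B < B := PySem.Int.mod_lt c (by omega)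
  by_contra hc
  rw [not_le] at hc
  nlinarith [mul_le_mul_of_nonneg_right (show PySem.Int.floordiv c B + 1 ≤ PySem.Int.floordiv a B by omega) (le_of_lt hB)]

theorem fd_anti {B a c : Int} (hB : B < 0) (h : a ≤ c) :
    PySem.Int.floordiv c B ≤ PySem.Int.floordiv a B := by
  have da := PySem.Int.floordiv_mul_add_mod a B
  have dc := PySem.Int.floordiv_mul_add_mod c B
  have r1 := PySem.Int.mod_neg_bounds a hB
  have r2 := PySem.Int.mod_neg_bounds c hB
  by_contra hc
  rw [not_le] at hc
  nlinarith [mul_le_mul_of_nonpos_right (show PySem.Int.floordiv a B + 1 ≤ PySem.Int.floordiv c B by omega) (le_of_lt hB)]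

theorem fd_zero {B : Int} (hB : B ≠ 0) : PySem.Int.floordiv 0 B = 0 := by
  have d := PySem.Int.floordiv_mul_add_mod 0 B
  rcases lt_or_gt_of_ne hB with hneg | hpos
  · have r := PySem.Int.mod_neg_bounds 0 hneg
    nlinarith [r.1, r.2]
  · have r1 : 0 ≤ PySem.Int.mod 0 B := PySem.Int.mod_nonneg 0 (by omega)
    have r2 : PySem.Int.mod 0 B < B := PySem.Int.mod_lt 0 (by omega)
    nlinarith

theorem mod_zero' {B : Int} (hB : B ≠ 0) : PySem.Int.mod 0 B = 0 := by
  have d := PySem.Int.floordiv_mul_add_mod 0 B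
  rw [fd_zero hB] at d
  omega

theorem mod_idem {B X : Int} (hB : 2 ≤ B ∨ B ≤ -2) :
    PySem.Int.mod (PySem.Int.mod X B) B = PySem.Int.mod X B := by
  have d := PySem.Int.floordiv_mul_add_mod (PySem.Int.mod X B) B
  have hq : PySem.Int.floordiv (PySem.Int.mod X B) B = 0 := by
    rcases hB with hB | hB
    · have r1 : 0 ≤ PySem.Int.mod X B := PySem.Int.mod_nonneg X (by omega)
      have r2 : PySem.Int.mod X B < B := PySem.Int.mod_lt X (by omega)
      have r3 : 0 ≤ PySem.Int.mod (PySem.Int.mod X B) B := PySem.Int.mod_nonneg _ (by omega)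
      have r4 : PySem.Int.mod (PySem.Int.mod X B) B < B := PySem.Int.mod_lt _ (by omega)
      by_contra hq
      rcases lt_or_gt_of_ne hq with h1 | h1
      · nlinarith [mul_le_mul_of_nonneg_right (show PySem.Int.floordiv (PySem.Int.mod X B) B ≤ -1 by omega) (show (0:Int) ≤ B by omega)]
      · nlinarith [mul_le_mul_of_nonneg_right (show 1 ≤ PySem.Int.floordiv (PySem.Int.mod X B) B by omega) (show (0:Int) ≤ B by omega)]
    · have r1 := PySem.Int.mod_neg_bounds X (show B < 0 by omega)
      have r3 := PySem.Int.mod_neg_bounds (PySem.Int.mod X B) (show B < 0 by omega)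
      by_contra hq
      rcases lt_or_gt_of_ne hq with h1 | h1
      · nlinarith [mul_le_mul_of_nonpos_right (show PySem.Int.floordiv (PySem.Int.mod X B) B ≤ -1 by omega) (show B ≤ 0 by omega), r1.1, r1.2, r3.1, r3.2]
      · nlinarith [mul_le_mul_of_nonpos_right (show 1 ≤ PySem.Int.floordiv (PySem.Int.mod X B) B by omega) (show B ≤ 0 by omega), r1.1, r1.2, r3.1, r3.2]
  rw [hq] at d
  omega

theorem fd_nonneg {B N : Int} (hB : 0 < B) (hN : 0 ≤ N) : 0 ≤ PySem.Int.floordiv N B := by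
  have := fd_mono hB hN
  rwa [fd_zero (by omega : B ≠ 0)] at this

theorem eval_digits (B N : Int) : ∀ res b, ((2 ≤ B ∧ 0 ≤ N) ∨ B ≤ -2) →
    evalGo B (digitsL B N) res b = res + b * N := by
  fun_induction digitsL B N with
  | case1 => intro res b h; simp [evalGo]
  | case2 N hN hg ih =>
      intro res b h
      have hg' : (2 ≤ B ∧ 0 ≤ PySem.Int.floordiv N B) ∨ B ≤ -2 := by
        rcases hg with ⟨h1, h2⟩ | h1
        · exact Or.inl ⟨h1, fd_nonneg (by omega) (by omega)⟩
        · exact Or.inr h1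
      have hadd := PySem.Int.floordiv_mul_add_mod N B
      rw [evalGo, ih _ _ hg']
      linear_combination b * hadd
  | case3 N hN hg => intro res b h; omega
theorem changeGo_eq (B N : Int) (acc : List Int) :
    changeGo B N acc = acc ++ digitsL B N := by
  fun_induction changeGo B N acc with
  | case1 acc => rw [digitsL]; simp
  | case2 N acc hN h ih =>
      rw [digitsL]
      rw [if_neg hN, dif_pos h, ih, List.append_assoc]
      rfl
  | case3 N acc hN h => rw [digitsL, if_neg hN, dif_neg h, List.append_nil]

theorem nimGo_eq (B X Y res b : Int) :
    nimGo B X Y res b = res + b * nimR B X Y := by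
  fun_induction nimGo B X Y res b with
  | case1 X Y res b hz => rw [nimR, if_pos hz]; ring
  | case2 X Y res b hz h ih => rw [nimR, if_neg hz, dif_pos h, ih]; ring
  | case3 X Y res b hz h => rw [nimR, if_neg hz, dif_neg h]; ring
theorem nimR_zero (B : Int) : ∀ X Y, ((2 ≤ B ∧ 0 ≤ X) ∨ B ≤ -2) → Y = 0 → nimR B X Y = X := by
  intro X Y
  fun_induction nimR B X Y with
  | case1 X Y hz => intro h hY; omega
  | case2 X Y hz hg ih =>
      intro h hY
      subst hY
      have hB : B ≠ 0 := by omega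
      have hX0 : X ≠ 0 := by tauto
      have hadd := PySem.Int.floordiv_mul_add_mod X B
      have hih := ih (by rcases hg with ⟨h1, h2, _⟩ | h1
                         · exact Or.inl ⟨h1, fd_nonneg (by omega) h2⟩
                         · exact Or.inr h1) (fd_zero hB)
      rw [fd_zero hB] at hih
      rw [mod_zero' hB, add_zero, mod_idem (by omega), fd_zero hB, hih]
      linear_combination hadd
  | case3 X Y hz hg => intro h hY; omega
theorem lenMono (B : Int) : ∀ n X Y, pvM X ≤ n → ((X ≤ Y ∧ Y ≤ 0) ∨ (0 ≤ Y ∧ Y ≤ X)) →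
    (digitsL B Y).length ≤ (digitsL B X).length := by
  intro n
  induction n with
  | zero =>
      intro X Y hm hbet
      have hX0 : X = 0 := by unfold pvM at hm; split_ifs at hm <;> omega
      have hY0 : Y = 0 := by omega
      rw [hX0, hY0]
  | succ n ih =>
      intro X Y hm hbet
      by_cases hY0 : Y = 0
      · rw [hY0, digitsL]; simp
      by_cases hgY : (2 ≤ B ∧ 0 < Y) ∨ B ≤ -2
      · have hX0 : X ≠ 0 := by omega
        have hgX : (2 ≤ B ∧ 0 < X) ∨ B ≤ -2 := by omega
        have hB0 : B ≠ 0 := by omega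
        have hdY : digitsL B Y = PySem.Int.mod Y B :: digitsL B (PySem.Int.floordiv Y B) := by
          rw [digitsL, if_neg hY0, dif_pos hgY]
        have hdX : digitsL B X = PySem.Int.mod X B :: digitsL B (PySem.Int.floordiv X B) := by
          rw [digitsL, if_neg hX0, dif_pos hgX]
        rw [hdX, hdY]
        simp only [List.length_cons, Nat.add_le_add_iff_right]
        apply ih
        · have := pvM_floordiv_lt B X (by omega); omega
        · by_cases hBle : B ≤ 0
          · have hBneg : B < 0 := by omega
            rcases hbet with ⟨h1, h2⟩ | ⟨h1, h2⟩
            · refine Or.inr ⟨?_, fd_anti hBneg h1⟩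
              have := fd_anti hBneg h2; rwa [fd_zero hB0] at this
            · refine Or.inl ⟨fd_anti hBneg h2, ?_⟩
              have := fd_anti hBneg h1; rwa [fd_zero hB0] at this
          · have hBpos : 0 < B := by omega
            rcases hbet with ⟨h1, h2⟩ | ⟨h1, h2⟩
            · refine Or.inl ⟨fd_mono hBpos h1, ?_⟩
              have := fd_mono hBpos h2; rwa [fd_zero hB0] at this
            · refine Or.inr ⟨?_, fd_mono hBpos h2⟩
              have := fd_mono hBpos h1; rwa [fd_zero hB0] at this
      · have hd : digitsL B Y = [] := by rw [digitsL, if_neg hY0, dif_neg hgY]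
        rw [hd]; simp

theorem digitsL_zero (B : Int) : digitsL B 0 = [] := by rw [digitsL]; simp

theorem main_lemma (B : Int) : ∀ n X Y, pvM X + pvM Y ≤ n → ∀ res b,
    ((2 ≤ B ∧ 0 ≤ X ∧ 0 ≤ Y) ∨ B ≤ -2) →
    (digitsL B Y).length ≤ (digitsL B X).length →
    evalGo B (addInto B (digitsL B X) (digitsL B Y)) res b = res + b * nimR B X Y := by
  intro n
  induction n with
  | zero =>
      intro X Y hm res b hg hlen
      have hz : X = 0 ∧ Y = 0 := by unfold pvM at hm; split_ifs at hm <;> omega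
      rw [hz.1, hz.2, digitsL_zero, nimR]
      simp [addInto, evalGo]
  | succ n ih =>
      intro X Y hm res b hg hlen
      by_cases hz : X = 0 ∧ Y = 0
      · rw [hz.1, hz.2, digitsL_zero, nimR]
        simp [addInto, evalGo]
      by_cases hY0 : Y = 0
      · subst hY0
        rw [digitsL_zero]
        have haddnil : ∀ xs, addInto B xs [] = xs := fun xs => by cases xs <;> rfl
        rw [haddnil, eval_digits B X res b (by omega), nimR_zero B X 0 (by omega) rfl]
      · have hgY : (2 ≤ B ∧ 0 < Y) ∨ B ≤ -2 := by omega
        have hdY : digitsL B Y = PySem.Int.mod Y B :: digitsL B (PySem.Int.floordiv Y B) := by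
          rw [digitsL, if_neg hY0, dif_pos hgY]
        have hX0 : X ≠ 0 := by
          intro hX
          rw [hX, digitsL_zero, hdY] at hlen
          simp at hlen
        have hgX : (2 ≤ B ∧ 0 < X) ∨ B ≤ -2 := by omega
        have hdX : digitsL B X = PySem.Int.mod X B :: digitsL B (PySem.Int.floordiv X B) := by
          rw [digitsL, if_neg hX0, dif_pos hgX]
        have hg' : (2 ≤ B ∧ 0 ≤ PySem.Int.floordiv X B ∧ 0 ≤ PySem.Int.floordiv Y B) ∨ B ≤ -2 := by
          rcases hg with ⟨h1, h2, h3⟩ | h1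
          · exact Or.inl ⟨h1, fd_nonneg (by omega) h2, fd_nonneg (by omega) h3⟩
          · exact Or.inr h1
        have hm' : pvM (PySem.Int.floordiv X B) + pvM (PySem.Int.floordiv Y B) ≤ n := by
          have h1 := pvM_floordiv_lt B X (by omega)
          have h2 := pvM_floordiv_le B Y (by omega)
          omega
        have hlen' : (digitsL B (PySem.Int.floordiv Y B)).length ≤ (digitsL B (PySem.Int.floordiv X B)).length := by
          rw [hdX, hdY] at hlen
          simpa using hlen
        rw [hdX, hdY]
        show evalGo B (PySem.Int.mod (PySem.Int.mod X B + PySem.Int.mod Y B) B ::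
          addInto B (digitsL B (PySem.Int.floordiv X B)) (digitsL B (PySem.Int.floordiv Y B))) res b
          = res + b * nimR B X Y
        rw [evalGo, ih _ _ hm' _ _ hg' hlen']
        conv_rhs => rw [nimR]
        rw [if_neg hz, dif_pos hg]
        ring

theorem nimR_comm (B : Int) : ∀ X Y, nimR B X Y = nimR B Y X := by
  intro X Y
  fun_induction nimR B X Y with
  | case1 X Y hz => rw [nimR, if_pos ⟨hz.2, hz.1⟩]
  | case2 X Y hz hg ih =>
      conv_rhs => rw [nimR]
      rw [if_neg (by tauto), dif_pos (by tauto),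
        add_comm (PySem.Int.mod Y B) (PySem.Int.mod X B), ih]
  | case3 X Y hz hg =>
      conv_rhs => rw [nimR]
      rw [if_neg (by tauto), dif_neg (by tauto)]
-- ===== VERDICT (by name: the statement is the Claim_ definition above) =====
theorem NimSum_spec : Claim_equal_NimSum := by
  intro B X Y hDom hPre
  obtain ⟨hB, hX, hY⟩ := hPre
  unfold Spec_NimSum NimSum_alt
  rw [nimGo_eq]
  by_cases hxy : X < Y
  · have hns : NimSum B X Y = evalGo B (addInto B (change Y B) (change X B)) 0 1 := by
      unfold NimSum; rw [if_pos hxy]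
    rw [hns]
    unfold change
    rw [changeGo_eq, changeGo_eq]
    simp only [List.nil_append]
    rw [main_lemma B (pvM Y + pvM X) Y X (le_refl _) 0 1 (by omega)
      (lenMono B (pvM Y) Y X (le_refl _) (Or.inr ⟨hX, by omega⟩)), nimR_comm]
  · have hns : NimSum B X Y = evalGo B (addInto B (change X B) (change Y B)) 0 1 := by
      unfold NimSum; rw [if_neg hxy]
    rw [hns]
    unfold change
    rw [changeGo_eq, changeGo_eq]
    simp only [List.nil_append]
    rw [main_lemma B (pvM X + pvM Y) X Y (le_refl _) 0 1 (by omega)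
      (lenMono B (pvM X) X Y (le_refl _) (Or.inr ⟨hY, by omega⟩))]
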